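-- pv_equiv track=rewrite | github.com/AdamAtkins-Public/current | Project_Euler/python/p095.py | delver
-- ===== SOURCE A (Python) =====
-- def divisors(n):
--     div = [1]
--     for i in range(2,int(n/2)+1):
--         if n % i == 0:
--             div.append(i)
--     return div
--
-- def delver(start,dict):
--     def delve(start,chain,dict):
--         if chain[-1] > 1000000:
--             return []
--         if not chain[-1] in dict:
--             dict[chain[-1]] = sum(div for div in divisors(chain[-1]))
--         if dict[chain[-1]] == start:
--             return chain.copy()
--         elif dict[chain[-1]] in chain:
--             return []
--         else:
--             chain.append(dict[chain[-1]])
--             return delve(start,chain,dict).copy()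
--
--     chain = []
--     chain.append(start)
--     chain = delve(start,chain,dict)
--     return chain
-- ===== SOURCE B (Python) =====
-- def _pdsum(n):
--     # proper-divisor sum via sqrt factorization; 1 for n < 2 (matches divisors()'s [1] seed on empty range)
--     if n < 2:
--         return 1
--     s = 1
--     i = 2
--     while i * i <= n:
--         if n % i == 0:
--             s += i
--             j = n // i
--             if j != i:
--                 s += j
--         i += 1
--     return s
--
-- def delver(start, dict):
--     chain = [start]
--     while True:
--         cur = chain[-1]
--         if cur > 1000000:
--             return []
--         if cur not in dict:
--             dict[cur] = _pdsum(cur)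
--         nxt = dict[cur]
--         if nxt == start:
--             return chain
--         if nxt in chain:
--             return []
--         chain.append(nxt)
-- ===== Notes on version B (the rewrite author's own statement) =====
-- stated objective: alternative
-- what changed: B computes each proper-divisor sum by factor pairs up to sqrt(n) instead of A's trial scan up to n/2, and walks the chain with an iterative loop instead of A's recursion.
import Mathlib
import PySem

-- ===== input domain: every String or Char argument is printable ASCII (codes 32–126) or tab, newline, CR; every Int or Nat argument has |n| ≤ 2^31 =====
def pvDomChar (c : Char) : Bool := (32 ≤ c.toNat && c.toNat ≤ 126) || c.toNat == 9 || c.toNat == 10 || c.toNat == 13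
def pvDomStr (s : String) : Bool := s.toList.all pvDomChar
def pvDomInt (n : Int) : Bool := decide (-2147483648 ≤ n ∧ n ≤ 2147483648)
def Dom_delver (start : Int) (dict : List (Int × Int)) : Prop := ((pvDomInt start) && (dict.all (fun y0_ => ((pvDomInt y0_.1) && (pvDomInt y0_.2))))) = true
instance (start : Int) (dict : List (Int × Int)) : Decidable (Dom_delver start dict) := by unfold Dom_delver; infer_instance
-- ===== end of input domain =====

-- B replaces A's trial scan over [2, n/2] per proper-divisor sum by a factor-pair sum over
-- [2, √n] and A's recursion by an iterative chain walk; equivalence is about the RETURN value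
-- (both Pythons also cache the same values under the same keys in the caller's dict).

-- ===== PORT A =====
def divisorsA (n : Int) : List Int :=
  (PySem.List.pyRange 2 (Int.tdiv n 2 + 1) 1).foldl
    (fun div i => if PySem.Int.mod n i == 0 then div ++ [i] else div) [1]

-- A's inner `delve`; the bound `fuel` only makes the recursion total (the chain strictly grows
-- inside a finite value set, so for the fuel chosen in `delver` it is never exhausted).
def delveA (start : Int) (dict : PySem.Dict Int Int) (chain : List Int) : Nat → List Int
  | 0 => []
  | fuel+1 =>
    let last := PySem.List.pyGetD chain (-1) 0
    if last > 1000000 then []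
    else
      let dict := if dict.contains last then dict else dict.insert last (divisorsA last).sum
      let v := dict.getD last 0
      if v == start then chain
      else if chain.contains v then []
      else delveA start dict (chain ++ [v]) fuel

def delver (start : Int) (dict : List (Int × Int)) : List Int :=
  delveA start (PySem.Dict.ofList dict) ([] ++ [start]) (dict.length + 20000000)

-- ===== PORT B =====
-- Source B `_pdsum`'s while-loop; fuel only totalizes the loop (i climbs to √n, fuel = n.toNat suffices).
def pdsumLoop (n : Int) (s : Int) (i : Int) : Nat → Int
  | 0 => s
  | fuel+1 =>
    if i * i ≤ n then
      pdsumLoop n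
        (if PySem.Int.mod n i == 0 then
           s + i + (if PySem.Int.floordiv n i ≠ i then PySem.Int.floordiv n i else 0)
         else s) (i + 1) fuel
    else s

def pdsum (n : Int) : Int := if n < 2 then 1 else pdsumLoop n 1 2 n.toNat

-- Source B's main while-loop; fuel only totalizes it (same bound as A's).
def delveLoopB (start : Int) (dict : PySem.Dict Int Int) (chain : List Int) (cur : Int) : Nat → List Int
  | 0 => []
  | fuel+1 =>
    if cur ≤ 1000000 then
      let dict := if dict.contains cur then dict else dict.insert cur (pdsum cur)
      let nxt := dict.getD cur 0
      let chain := chain ++ [cur]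
      if nxt == start then chain
      else if chain.contains nxt then []
      else delveLoopB start dict chain nxt fuel
    else []

def delver_alt (start : Int) (dict : List (Int × Int)) : List Int :=
  delveLoopB start (PySem.Dict.ofList dict) [] start (dict.length + 20000000)

-- ===== PRECONDITION & SPEC =====
def Spec_delver (start : Int) (dict : List (Int × Int)) (out : List Int) : Prop := out = delver_alt start dict
instance (start : Int) (dict : List (Int × Int)) (out : List Int) : Decidable (Spec_delver start dict out) := by unfold Spec_delver; infer_instance

-- ===== CLAIM (what is proved, stated in full; the proofs are below) =====
def Claim_equal_delver : Prop := ∀ (start : Int) (dict : List (Int × Int)), Dom_delver start dict → Spec_delver start dict (delver start dict)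

-- ===== LEMMAS AND PROOFS =====

-- list sum of a filter as a sum of an if-map
lemma sum_filter_list (p : Int → Bool) (l : List Int) :
    (l.filter p).sum = (l.map (fun i => if p i then i else 0)).sum := by
  induction l with
  | nil => rfl
  | cons x xs ih => by_cases h : p x <;> simp [List.filter_cons, h, ih]

-- list sum over a Python range with Nat endpoints as a Finset.Ico sum
lemma sum_map_pyRange (f : Int → Int) (a b : Nat) :
    ((PySem.List.pyRange a b 1).map f).sum = ∑ i ∈ Finset.Ico a b, f (i : Int) := by
  rw [PySem.List.pyRange_one, List.map_map, Finset.sum_Ico_eq_sum_range]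
  have hn : ((b:Int) - (a:Int)).toNat = b - a := by omega
  rw [hn]
  induction (b - a) with
  | zero => simp
  | succ n ih => rw [Finset.sum_range_succ, List.range_succ]; simp [ih]

-- the sqrt-pairing identity over ℕ (Int-valued): divisors in [2, m/2] summed directly
-- equal the factor pairs collected over [2, √m]
lemma keyNat (m : Nat) :
    (∑ i ∈ Finset.Ico 2 (m/2+1), if i ∣ m then (i:Int) else 0)
      = ∑ i ∈ Finset.Ico 2 (m.sqrt+1),
          (if i ∣ m then ((i:Int) + if m/i ≠ i then ((m/i : Nat) : Int) else 0) else 0) := by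
  rcases Nat.eq_zero_or_pos m with hm | hm
  · subst hm; decide
  rw [← Finset.sum_filter, ← Finset.sum_filter]
  have hD1 : (Finset.Ico 2 (m/2+1)).filter (· ∣ m)
      = m.divisors.filter (fun d => 2 ≤ d ∧ d ≤ m/2) := by
    ext d
    simp only [Finset.mem_filter, Finset.mem_Ico, Nat.mem_divisors]
    constructor
    · rintro ⟨⟨h2, h3⟩, hd⟩; exact ⟨⟨hd, by omega⟩, h2, by omega⟩
    · rintro ⟨⟨hd, _⟩, h2, h3⟩; exact ⟨⟨h2, by omega⟩, hd⟩
  have hF : (Finset.Ico 2 (m.sqrt+1)).filter (· ∣ m)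
      = m.divisors.filter (fun d => 2 ≤ d ∧ d * d ≤ m) := by
    ext d
    simp only [Finset.mem_filter, Finset.mem_Ico, Nat.mem_divisors]
    constructor
    · rintro ⟨⟨h2, h3⟩, hd⟩; exact ⟨⟨hd, by omega⟩, h2, Nat.le_sqrt.mp (by omega)⟩
    · rintro ⟨⟨hd, _⟩, h2, h3⟩
      exact ⟨⟨h2, by have := Nat.le_sqrt.mpr h3; omega⟩, hd⟩
  rw [hD1, hF]
  rw [← Finset.sum_filter_add_sum_filter_not (m.divisors.filter (fun d => 2 ≤ d ∧ d ≤ m/2)) (fun d => d * d ≤ m)]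
  rw [Finset.sum_add_distrib, ← Finset.sum_filter]
  have hsmall : ((m.divisors.filter (fun d => 2 ≤ d ∧ d ≤ m/2)).filter (fun d => d * d ≤ m))
      = m.divisors.filter (fun d => 2 ≤ d ∧ d * d ≤ m) := by
    ext d
    simp only [Finset.mem_filter, Nat.mem_divisors]
    constructor
    · rintro ⟨⟨⟨hd, _⟩, h2, _⟩, h4⟩; exact ⟨⟨hd, by omega⟩, h2, h4⟩
    · rintro ⟨⟨hd, _⟩, h2, h4⟩
      refine ⟨⟨⟨hd, by omega⟩, h2, ?_⟩, h4⟩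
      exact Nat.le_div_iff_mul_le (by omega) |>.mpr (by nlinarith)
  have hG : ((m.divisors.filter (fun d => 2 ≤ d ∧ d ≤ m/2)).filter (fun d => ¬ d * d ≤ m))
      = m.divisors.filter (fun d => 2 ≤ d ∧ d ≤ m/2 ∧ m < d * d) := by
    ext d
    simp only [Finset.mem_filter, Nat.mem_divisors, not_le]
    constructor
    · rintro ⟨⟨⟨hd, _⟩, h2, h3⟩, h4⟩; exact ⟨⟨hd, by omega⟩, h2, h3, h4⟩
    · rintro ⟨⟨hd, _⟩, h2, h3, h4⟩; exact ⟨⟨⟨hd, by omega⟩, h2, h3⟩, h4⟩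
  have hH : ((m.divisors.filter (fun d => 2 ≤ d ∧ d * d ≤ m)).filter (fun d => m / d ≠ d))
      = m.divisors.filter (fun d => 2 ≤ d ∧ d * d < m) := by
    ext d
    simp only [Finset.mem_filter, Nat.mem_divisors]
    constructor
    · rintro ⟨⟨⟨hd, _⟩, h2, h4⟩, h5⟩
      refine ⟨⟨hd, by omega⟩, h2, ?_⟩
      rcases lt_or_eq_of_le h4 with h | h
      · exact h
      · exact absurd (by rw [← h]; exact Nat.mul_div_cancel_left d (show 0 < d by omega)) h5
    · rintro ⟨⟨hd, _⟩, h2, h4⟩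
      refine ⟨⟨⟨hd, by omega⟩, h2, by omega⟩, ?_⟩
      intro hdiv
      obtain ⟨c, hc⟩ := hd
      have hcne : m / d = c := by subst hc; exact Nat.mul_div_cancel_left c (by omega)
      rw [hcne] at hdiv
      subst hdiv
      nlinarith
  rw [hsmall, hG, hH]
  congr 1
  refine Finset.sum_nbij' (i := fun d => m / d) (j := fun d => m / d) ?_ ?_ ?_ ?_ ?_
  all_goals
    intro d hdmem
    simp only [Finset.mem_filter, Nat.mem_divisors] at hdmem
  · obtain ⟨⟨⟨c, hc⟩, _⟩, h2, h3, h4⟩ := hdmem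
    have hdc : m / d = c := by subst hc; exact Nat.mul_div_cancel_left c (by omega)
    have hc2 : 2 ≤ c := by
      have h5 := Nat.le_div_iff_mul_le (show 0 < 2 by omega) |>.mp h3
      nlinarith
    have hcd : c < d := by nlinarith
    show m / d ∈ _
    simp only [Finset.mem_filter, Nat.mem_divisors]
    rw [hdc]
    exact ⟨⟨⟨d, by rw [hc]; ring⟩, by omega⟩, hc2, by nlinarith⟩
  · obtain ⟨⟨⟨c, hc⟩, _⟩, h2, h3⟩ := hdmem
    have hdc : m / d = c := by subst hc; exact Nat.mul_div_cancel_left c (by omega)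
    have hdlt : d < c := by nlinarith
    show m / d ∈ _
    simp only [Finset.mem_filter, Nat.mem_divisors]
    rw [hdc]
    refine ⟨⟨⟨d, by rw [hc]; ring⟩, by omega⟩, by omega, ?_, by nlinarith⟩
    exact Nat.le_div_iff_mul_le (by omega) |>.mpr (by nlinarith)
  · obtain ⟨⟨⟨c, hc⟩, _⟩, h2, h3, h4⟩ := hdmem
    have hdc : m / d = c := by subst hc; exact Nat.mul_div_cancel_left c (by omega)
    have hc0 : 0 < c := by nlinarith
    show m / (m / d) = d
    rw [hdc]
    subst hc
    rw [mul_comm]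
    exact Nat.mul_div_cancel_left d hc0
  · obtain ⟨⟨⟨c, hc⟩, _⟩, h2, h3⟩ := hdmem
    have hdc : m / d = c := by subst hc; exact Nat.mul_div_cancel_left c (by omega)
    have hc0 : 0 < c := by nlinarith
    show m / (m / d) = d
    rw [hdc]
    subst hc
    rw [mul_comm]
    exact Nat.mul_div_cancel_left d hc0
  · obtain ⟨⟨⟨c, hc⟩, _⟩, h2, h3, h4⟩ := hdmem
    have hdc : m / d = c := by subst hc; exact Nat.mul_div_cancel_left c (by omega)
    have hc0 : 0 < c := by nlinarith
    show (d : Int) = ((m / (m / d) : Nat) : Int)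
    rw [hdc]
    congr 1
    rw [hc, mul_comm]
    exact (Nat.mul_div_cancel_left d hc0).symm

-- B's loop computes the factor-pair sum over [2, √m]
lemma pdsumLoop_char (m : Nat) :
    ∀ (fuel : Nat) (i : Nat) (s : Int), 2 ≤ i → m.sqrt + 1 ≤ i + fuel →
      pdsumLoop (m : Int) s (i : Int) fuel
        = s + ∑ j ∈ Finset.Ico i (m.sqrt+1),
            (if j ∣ m then ((j:Int) + if m/j ≠ j then ((m/j : Nat) : Int) else 0) else 0) := by
  intro fuel
  induction fuel with
  | zero =>
    intro i s hi hf
    rw [pdsumLoop, Finset.Ico_eq_empty (by omega)]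
    simp
  | succ fuel ih =>
    intro i s hi hf
    rw [pdsumLoop]
    by_cases h : (i:Int) * (i:Int) ≤ (m:Int)
    · have hii : i * i ≤ m := by exact_mod_cast h
      have hisq : i ≤ m.sqrt := Nat.le_sqrt.mpr hii
      have hlt : i < m.sqrt + 1 := by omega
      rw [if_pos h]
      have hcast : ((i:Int) + 1) = ((i+1 : Nat) : Int) := by push_cast; ring
      rw [hcast, ih (i+1) _ (by omega) (by omega)]
      rw [Finset.sum_eq_sum_Ico_succ_bot hlt]
      have hmod : PySem.Int.mod (m:Int) (i:Int) = ((m % i : Nat) : Int) := PySem.Int.mod_natCast m i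
      have hfd : PySem.Int.floordiv (m:Int) (i:Int) = ((m / i : Nat) : Int) := PySem.Int.floordiv_natCast m i
      rw [hmod, hfd]
      by_cases hdvd : i ∣ m
      · have hmz : m % i = 0 := Nat.dvd_iff_mod_eq_zero.mp hdvd
        rw [hmz, if_pos hdvd]
        simp only [Nat.cast_zero, beq_self_eq_true, if_true]
        by_cases hne : m / i = i
        · rw [if_neg (not_not_intro (by exact_mod_cast hne)), if_neg (not_not_intro hne)]; ring
        · rw [if_pos (by exact_mod_cast hne), if_pos hne]; ring
      · have hmz : m % i ≠ 0 := fun h => hdvd (Nat.dvd_iff_mod_eq_zero.mpr h)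
        rw [if_neg (show ¬ ((((m % i : Nat) : Int) == 0) = true) by simp only [beq_iff_eq, Int.natCast_eq_zero]; exact hmz), if_neg hdvd]
        ring
    · have hgt : m < i * i := by exact_mod_cast not_le.mp h
      have : m.sqrt < i := Nat.sqrt_lt'.mpr (by nlinarith) |>.trans_le (le_refl i)
      rw [if_neg h, Finset.Ico_eq_empty (by omega)]
      simp

-- the heart: A's trial-division proper-divisor sum equals B's sqrt factor-pair sum, for every n
lemma divsum_eq (n : Int) : (divisorsA n).sum = pdsum n := by
  unfold divisorsA pdsum
  have hfold := PySem.List.foldl_append_if (fun i => PySem.Int.mod n i == 0) (id : Int → Int)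
    (PySem.List.pyRange 2 (Int.tdiv n 2 + 1) 1) [1]
  simp only [id] at hfold
  rw [hfold, List.map_id, List.sum_append, List.sum_cons, List.sum_nil, add_zero]
  by_cases hn : n < 2
  · rw [if_pos hn]
    have hb : Int.tdiv n 2 + 1 ≤ 2 := by
      by_cases h0 : 0 ≤ n
      · rw [Int.tdiv_eq_ediv_of_nonneg h0]; omega
      · rw [show n = -(-n) by ring, Int.neg_tdiv, Int.tdiv_eq_ediv_of_nonneg (by omega)]; omega
    rw [PySem.List.pyRange_one, show ((Int.tdiv n 2 + 1) - 2).toNat = 0 by omega]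
    simp
  · rw [if_neg hn]
    set m := n.toNat with hmdef
    have hnm : n = (m : Int) := by omega
    have hm2 : 2 ≤ m := by omega
    have hb : Int.tdiv n 2 + 1 = ((m/2+1 : Nat) : Int) := by
      rw [hnm, Int.tdiv_eq_ediv_of_nonneg (by positivity),
        show ((m:Int))/2 = ((m/2:Nat):Int) from (Nat.ToInt.div_congr rfl rfl).symm]
      push_cast
      ring
    have h2c : (2 : Int) = ((2 : Nat) : Int) := by norm_num
    rw [sum_filter_list, hb, h2c, sum_map_pyRange]
    rw [hnm, pdsumLoop_char m m 2 1 (by omega)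
      (by have := Nat.sqrt_le_self m; omega)]
    have hL : ∀ i ∈ Finset.Ico 2 (m/2+1),
        (if (PySem.Int.mod (m:Int) (i:Int) == 0) = true then (i:Int) else 0)
          = (if i ∣ m then (i:Int) else 0) := by
      intro i hi
      have h2i : 2 ≤ i := (Finset.mem_Ico.mp hi).1
      rw [PySem.Int.mod_natCast]
      by_cases hd : i ∣ m
      · rw [if_pos hd, if_pos (by simp [beq_iff_eq]; exact_mod_cast hd)]
      · rw [if_neg hd, if_neg (by simp [beq_iff_eq]; exact fun h => hd (by exact_mod_cast h))]
    calc 1 + ∑ i ∈ Finset.Ico 2 (m/2+1),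
            (if (PySem.Int.mod (m:Int) (i:Int) == 0) = true then (i:Int) else 0)
        = 1 + ∑ i ∈ Finset.Ico 2 (m/2+1), (if i ∣ m then (i:Int) else 0) := by
          rw [Finset.sum_congr rfl hL]
      _ = 1 + ∑ i ∈ Finset.Ico 2 (m.sqrt+1),
            (if i ∣ m then ((i:Int) + if m/i ≠ i then ((m/i : Nat) : Int) else 0) else 0) := by
          rw [keyNat]
      _ = _ := by ring

-- the chain walks agree step for step
lemma delve_eq (start : Int) : ∀ (fuel : Nat) (d : PySem.Dict Int Int) (pre : List Int) (cur : Int),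
    delveA start d (pre ++ [cur]) fuel = delveLoopB start d pre cur fuel := by
  intro fuel
  induction fuel with
  | zero => intro d pre cur; rfl
  | succ fuel ih =>
    intro d pre cur
    simp only [delveA, delveLoopB, PySem.List.pyGetD_neg_one_append_singleton, divsum_eq]
    by_cases h1 : cur > 1000000
    · simp [h1, (show ¬ cur ≤ 1000000 by omega)]
    · rw [if_neg h1, if_pos (show cur ≤ 1000000 by omega)]
      set d' := if d.contains cur then d else d.insert cur (pdsum cur) with hd'
      set v := d'.getD cur 0 with hv
      by_cases h2 : (v == start) = true
      · rw [if_pos h2, if_pos h2]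
      · rw [if_neg h2, if_neg h2]
        by_cases h3 : ((pre ++ [cur]).contains v) = true
        · rw [if_pos h3, if_pos h3]
        · rw [if_neg h3, if_neg h3]
          exact ih d' (pre ++ [cur]) v

-- ===== VERDICT (by name: the statement is the Claim_ definition above) =====
theorem delver_spec : Claim_equal_delver := by
  intro start dict _
  unfold Spec_delver delver delver_alt
  exact delve_eq start _ _ [] start
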